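-- pv_equiv track=rewrite | github.com/samucj73/Lotoeasy | modulo_conferencia.py | conferir_cartoes
-- ===== SOURCE A (Python) =====
-- from collections import Counter
--
-- def conferir_cartoes(cartoes, ultimos_resultados):
--     """
--     Compara os cartões gerados com os últimos 25 concursos.
--
--     Parâmetros:
--     - cartoes: lista de listas (cada cartão com 15 dezenas)
--     - ultimos_resultados: lista de tuplas (concurso, data, dezenas sorteadas)
--
--     Retorna:
--     - lista de tuplas: (concurso, acertos_por_cartao)
--     - contagem de acertos por faixa (Counter)
--     """
--     resultados = []
--     faixa_acertos = Counter()
--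
--     for concurso, data, dezenas_sorteadas in ultimos_resultados:
--         acertos_por_cartao = []
--         sorteio = set(dezenas_sorteadas)
--         for cartao in cartoes:
--             acertos = len(set(cartao) & sorteio)
--             acertos_por_cartao.append(acertos)
--             if 11 <= acertos <= 15:
--                 faixa_acertos[acertos] += 1
--         resultados.append((concurso, acertos_por_cartao))
--
--     return resultados, faixa_acertos
-- ===== SOURCE B (Python) =====
-- from collections import Counter
--
-- def conferir_cartoes(cartoes, ultimos_resultados):
--     # Inverted index: dezena -> list of card indices containing it (cards deduped).
--     index = {}
--     for i, cartao in enumerate(cartoes):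
--         for dz in set(cartao):
--             index.setdefault(dz, []).append(i)
--     n = len(cartoes)
--     resultados = []
--     faixa_acertos = Counter()
--     for concurso, data, dezenas_sorteadas in ultimos_resultados:
--         counts = [0] * n
--         for d in set(dezenas_sorteadas):
--             for i in index.get(d, []):
--                 counts[i] += 1
--         for a in counts:
--             if 11 <= a <= 15:
--                 faixa_acertos[a] += 1
--         resultados.append((concurso, counts))
--     return resultados, faixa_acertos
-- ===== Notes on version B (the rewrite author's own statement) =====
-- stated objective: faster
-- what changed: B builds an inverted index (dezena -> list of card indices) once, then for each draw scatter-adds +1 into a zero-initialized counts array per drawn dezena, instead of A's set intersection of every card with every draw.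
import Mathlib
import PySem

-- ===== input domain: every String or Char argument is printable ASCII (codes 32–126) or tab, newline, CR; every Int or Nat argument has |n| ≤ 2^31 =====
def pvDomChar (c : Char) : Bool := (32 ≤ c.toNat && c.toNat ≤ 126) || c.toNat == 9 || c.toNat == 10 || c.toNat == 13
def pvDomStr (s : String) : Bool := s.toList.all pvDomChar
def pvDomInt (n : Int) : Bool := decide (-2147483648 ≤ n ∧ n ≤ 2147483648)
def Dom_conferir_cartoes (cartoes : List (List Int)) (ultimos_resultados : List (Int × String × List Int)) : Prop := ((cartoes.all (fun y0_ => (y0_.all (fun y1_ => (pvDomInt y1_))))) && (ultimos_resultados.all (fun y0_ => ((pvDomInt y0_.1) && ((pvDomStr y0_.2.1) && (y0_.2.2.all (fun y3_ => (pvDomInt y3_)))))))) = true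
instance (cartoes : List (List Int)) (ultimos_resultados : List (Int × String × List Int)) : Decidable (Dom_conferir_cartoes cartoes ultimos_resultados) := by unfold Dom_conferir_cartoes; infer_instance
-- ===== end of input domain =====

-- B replaces A's per-draw scan over every card (a set intersection per card per draw) by an
-- inverted index dezena -> card indices built once, with per-draw scatter-adds into a counts array (objective: faster; a timing run measured B ≥1.5× faster).


-- ===== PORT A =====
def conferir_cartoes (cartoes : List (List Int)) (ultimos_resultados : List (Int × String × List Int)) : (List (Int × List Int)) × (List (Int × Int)) :=
  let st := ultimos_resultados.foldl (fun st t =>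
    let sorteio : PySem.Set Int := PySem.Set.ofList t.2.2
    let inner := cartoes.foldl (fun st2 cartao =>
      let acertos : Int := PySem.Set.len (PySem.Set.inter (PySem.Set.ofList cartao) sorteio)
      (st2.1 ++ [acertos],
       if 11 ≤ acertos ∧ acertos ≤ 15 then st2.2.modify acertos 0 (· + 1) else st2.2))
      (([] : List Int), st.2)
    (st.1 ++ [(t.1, inner.1)], inner.2))
    (([] : List (Int × List Int)), (PySem.Dict.empty : PySem.Dict Int Int))
  (st.1, st.2.items)

-- ===== PORT B =====
-- index.setdefault(dz, []).append(i)
def pvIndex (cartoes : List (List Int)) : PySem.Dict Int (List Int) :=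
  (PySem.List.enumerate cartoes).foldl
    (fun d p => (PySem.Set.ofList p.2).foldl (fun d dz => d.modify dz [] (· ++ [p.1])) d)
    PySem.Dict.empty

-- counts[i] += 1; exact because every index in an index bucket is a nonnegative
-- enumerate position < len(counts) (so Python's counts[i] never raises or wraps).
def pvIncr (counts : List Int) (i : Int) : List Int :=
  counts.set i.toNat (counts.getD i.toNat 0 + 1)

def conferir_cartoes_alt (cartoes : List (List Int)) (ultimos_resultados : List (Int × String × List Int)) : (List (Int × List Int)) × (List (Int × Int)) :=
  let index := pvIndex cartoes
  let n := cartoes.length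
  let st := ultimos_resultados.foldl (fun st t =>
    let counts := (PySem.Set.ofList t.2.2).foldl
      (fun counts d => (index.getD d []).foldl pvIncr counts)
      (List.replicate n (0 : Int))
    let fx := counts.foldl
      (fun fx a => if 11 ≤ a ∧ a ≤ 15 then fx.modify a 0 (· + 1) else fx) st.2
    (st.1 ++ [(t.1, counts)], fx))
    (([] : List (Int × List Int)), (PySem.Dict.empty : PySem.Dict Int Int))
  (st.1, st.2.items)

-- ===== PRECONDITION & SPEC =====
def Spec_conferir_cartoes (cartoes : List (List Int)) (ultimos_resultados : List (Int × String × List Int)) (out : (List (Int × List Int)) × (List (Int × Int))) : Prop := out = conferir_cartoes_alt cartoes ultimos_resultados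
instance (cartoes : List (List Int)) (ultimos_resultados : List (Int × String × List Int)) (out : (List (Int × List Int)) × (List (Int × Int))) : Decidable (Spec_conferir_cartoes cartoes ultimos_resultados out) := by unfold Spec_conferir_cartoes; infer_instance

-- ===== CLAIM (what is proved, stated in full; the proofs are below) =====
def Claim_equal_conferir_cartoes : Prop := ∀ (cartoes : List (List Int)) (ultimos_resultados : List (Int × String × List Int)), Dom_conferir_cartoes cartoes ultimos_resultados → Spec_conferir_cartoes cartoes ultimos_resultados (conferir_cartoes cartoes ultimos_resultados)

-- ===== LEMMAS AND PROOFS =====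

-- a nodup list filtered for equality with d
theorem filter_beq_of_nodup (s : List Int) (h : s.Nodup) (d : Int) :
    s.filter (fun x => x == d) = if d ∈ s then [d] else [] := by
  induction s with
  | nil => simp
  | cons a s ih =>
    simp only [List.nodup_cons] at h
    rw [List.filter_cons]
    by_cases had : a = d
    · subst had; simp [h.1, ih h.2]
    · simp only [beq_iff_eq, had, ih h.2, List.mem_cons]
      simp [Ne.symm had]

theorem flatMap_ite_map_snd (l : List (Int × List Int)) (d : Int) :
    (l.flatMap (fun p => if d ∈ p.2 then [(d, p.1)] else [])).map (·.2)
      = (l.filter (fun p => decide (d ∈ p.2))).map (·.1) := by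
  induction l with
  | nil => rfl
  | cons a l ih => by_cases h : d ∈ a.2 <;> simp [h, ih]

-- The bucket of dezena d lists exactly the (enumerate) positions of the cards containing d.
theorem pvIndex_getD (cartoes : List (List Int)) (d : Int) :
    (pvIndex cartoes).getD d [] =
      ((PySem.List.enumerate cartoes).filter (fun p => decide (d ∈ p.2))).map (·.1) := by
  unfold pvIndex
  have hstep : ∀ (dct : PySem.Dict Int (List Int)) (p : Int × List Int),
      (PySem.Set.ofList p.2).foldl (fun d dz => d.modify dz [] (· ++ [p.1])) dct
        = ((PySem.Set.ofList p.2).map (fun dz => (dz, p.1))).foldl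
            (fun d q => d.modify q.1 [] (· ++ [q.2])) dct := by
    intro dct p; rw [List.foldl_map]
  simp only [hstep]
  rw [← List.foldl_flatMap, PySem.Dict.getD_foldl_modify_append]
  rw [List.filter_flatMap]
  have hinner : ∀ p : Int × List Int,
      (((PySem.Set.ofList p.2).map (fun dz => (dz, p.1))).filter (fun q => q.1 == d))
        = if d ∈ p.2 then [(d, p.1)] else [] := by
    intro p
    rw [List.filter_map]
    have := filter_beq_of_nodup (PySem.Set.ofList p.2) (PySem.Set.nodup_ofList _) d
    simp only [Function.comp_def] at *
    rw [this]
    by_cases h : d ∈ p.2 <;> simp [PySem.Set.mem_ofList, h]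
  simp only [hinner]
  rw [flatMap_ite_map_snd]
  rfl

theorem bucket_mem_range (cartoes : List (List Int)) (d i : Int)
    (hi : i ∈ (pvIndex cartoes).getD d []) : 0 ≤ i ∧ i.toNat < cartoes.length := by
  rw [pvIndex_getD] at hi
  simp only [List.mem_map, List.mem_filter] at hi
  obtain ⟨p, ⟨hp, _⟩, rfl⟩ := hi
  rw [PySem.List.mem_enumerate_iff] at hp
  obtain ⟨k, hk, rfl⟩ := hp
  simp; omega

-- how many times the bucket of d hits card position j
theorem bucket_count (d : Int) (xs : List (List Int)) (s : Int) (j : Nat) (hj : j < xs.length) :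
    (((PySem.List.enumerate xs s).filter (fun p => decide (d ∈ p.2))).map (·.1)).count (s + (j : Int))
      = if d ∈ xs[j] then 1 else 0 := by
  induction xs generalizing s j with
  | nil => simp at hj
  | cons x xs ih =>
    rw [PySem.List.enumerate_cons]
    have htail : ∀ q ∈ PySem.List.enumerate xs (s+1), s + 1 ≤ q.1 := by
      intro q hq
      rw [PySem.List.mem_enumerate_iff] at hq
      obtain ⟨k, hk, rfl⟩ := hq; simp
    cases j with
    | zero =>
      have h0 : (((PySem.List.enumerate xs (s+1)).filter (fun p => decide (d ∈ p.2))).map (·.1)).count s = 0 := by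
        rw [List.count_eq_zero]
        intro hmem
        simp only [List.mem_map, List.mem_filter] at hmem
        obtain ⟨q, ⟨hq, _⟩, hq1⟩ := hmem
        have := htail q hq; omega
      by_cases h : d ∈ x <;>
        simp [List.filter_cons, h, h0]
    | succ j =>
      have hrec := ih (s+1) j (by simpa using hj)
      have harith : s + ((j:Nat)+1 : Int) = (s+1) + (j : Int) := by ring
      by_cases h : d ∈ x <;>
        · rw [List.filter_cons]
          simp only [h, decide_true, decide_false, if_true, List.map_cons, List.count_cons]
          push_cast at hrec harith ⊢
          rw [harith, hrec]
          have hne : ¬ (s = s + 1 + (j:Int)) := by omega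
          simp [hne]

theorem foldl_pvIncr_length (l : List Int) (counts : List Int) :
    (l.foldl pvIncr counts).length = counts.length := by
  induction l generalizing counts with
  | nil => rfl
  | cons i l ih => simp [List.foldl_cons, ih, pvIncr]

theorem foldl_pvIncr_getD (l : List Int) (counts : List Int) (j : Nat)
    (hl : ∀ i ∈ l, 0 ≤ i ∧ i.toNat < counts.length) :
    (l.foldl pvIncr counts).getD j 0 = counts.getD j 0 + (l.count (j : Int) : Int) := by
  induction l generalizing counts with
  | nil => simp
  | cons i l ih =>
    have hi := hl i (List.mem_cons_self)
    rw [List.foldl_cons, ih _ (fun x hx => by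
      have := hl x (List.mem_cons_of_mem _ hx); simpa [pvIncr] using this)]
    rw [List.count_cons]
    by_cases h : i = (j : Int)
    · have hj : i.toNat = j := by omega
      have hjl : j < counts.length := by omega
      simp [pvIncr, List.getD, hjl, h]
      ring
    · have hj : i.toNat ≠ j := by omega
      simp [pvIncr, List.getD, List.getElem?_set_ne hj, h]

theorem scatter_length (cartoes : List (List Int)) (D : List Int) (counts : List Int) :
    (D.foldl (fun cs d => ((pvIndex cartoes).getD d []).foldl pvIncr cs) counts).length
      = counts.length := by
  induction D generalizing counts with
  | nil => rfl
  | cons d D ih => rw [List.foldl_cons, ih, foldl_pvIncr_length]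

theorem scatter_getD (cartoes : List (List Int)) (D : List Int) (counts : List Int)
    (hlen : counts.length = cartoes.length) (j : Nat) :
    (D.foldl (fun cs d => ((pvIndex cartoes).getD d []).foldl pvIncr cs) counts).getD j 0
      = counts.getD j 0
        + (D.map (fun d => (((pvIndex cartoes).getD d []).count (j : Int) : Int))).sum := by
  induction D generalizing counts with
  | nil => simp
  | cons d D ih =>
    rw [List.foldl_cons, ih _ (by rw [foldl_pvIncr_length, hlen]),
      foldl_pvIncr_getD _ _ _ (fun i hi => by
        have := bucket_mem_range cartoes d i hi; omega)]
    simp [add_assoc]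

-- |set(c) & set(dz)| counted from the draw's side
theorem acertos_sym (c dz : List Int) :
    PySem.Set.len (PySem.Set.inter (PySem.Set.ofList c) (PySem.Set.ofList dz)) =
      ((PySem.Set.ofList dz).countP (fun x => decide (x ∈ c)) : Int) := by
  have h1 : PySem.Set.inter (PySem.Set.ofList c) (PySem.Set.ofList dz)
      = (PySem.Set.ofList c).filter (fun x => decide (x ∈ dz)) := by
    simp [PySem.Set.inter, PySem.Set.contains_eq_listContains]
  have hperm : ((PySem.Set.ofList c).filter (fun x => decide (x ∈ dz))).Perm
      ((PySem.Set.ofList dz).filter (fun x => decide (x ∈ c))) := by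
    rw [List.perm_ext_iff_of_nodup (List.Nodup.filter _ (PySem.Set.nodup_ofList c))
      (List.Nodup.filter _ (PySem.Set.nodup_ofList dz))]
    intro x
    simp [List.mem_filter, PySem.Set.mem_ofList, and_comm]
  rw [List.countP_eq_length_filter]
  simp [PySem.Set.len, h1, hperm.length_eq]

-- B's scattered counts for one draw = A's per-card intersection sizes
theorem counts_eq_map (cartoes : List (List Int)) (dz : List Int) :
    (PySem.Set.ofList dz).foldl
        (fun counts d => (((pvIndex cartoes).getD d []).foldl pvIncr counts))
        (List.replicate cartoes.length (0 : Int)) =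
      cartoes.map (fun c =>
        PySem.Set.len (PySem.Set.inter (PySem.Set.ofList c) (PySem.Set.ofList dz))) := by
  apply List.ext_getElem
  · rw [scatter_length]; simp
  · intro j hj hj2
    have hjn : j < cartoes.length := by simpa using hj2
    rw [← List.getD_eq_getElem _ 0 hj, ← List.getD_eq_getElem _ 0 hj2]
    rw [scatter_getD cartoes _ _ (by simp) j]
    have hterm : ∀ d ∈ PySem.Set.ofList dz,
        (((pvIndex cartoes).getD d []).count (j : Int) : Int)
          = if decide (d ∈ cartoes[j]) then (1:Int) else 0 := by
      intro d _
      rw [pvIndex_getD]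
      have := bucket_count d cartoes 0 j hjn
      rw [show (0 : Int) + (j : Int) = (j : Int) by ring] at this
      rw [this]
      by_cases h : d ∈ cartoes[j] <;> simp [h]
    rw [List.map_congr_left hterm, PySem.List.sum_map_ite_one_zero]
    conv_rhs => rw [List.getD_eq_getElem _ 0 (by simpa using hjn)]
    rw [List.getElem_map, acertos_sym]
    simp

-- ===== VERDICT (by name: the statement is the Claim_ definition above) =====
theorem conferir_cartoes_spec : Claim_equal_conferir_cartoes := by
  intro cartoes ur _
  unfold Spec_conferir_cartoes conferir_cartoes conferir_cartoes_alt
  have hfun :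
      (fun (st : List (Int × List Int) × PySem.Dict Int Int) (t : Int × String × List Int) =>
        let sorteio : PySem.Set Int := PySem.Set.ofList t.2.2
        let inner := cartoes.foldl (fun st2 cartao =>
          let acertos : Int := PySem.Set.len (PySem.Set.inter (PySem.Set.ofList cartao) sorteio)
          (st2.1 ++ [acertos],
           if 11 ≤ acertos ∧ acertos ≤ 15 then st2.2.modify acertos 0 (· + 1) else st2.2))
          (([] : List Int), st.2)
        (st.1 ++ [(t.1, inner.1)], inner.2))
      = (fun st t =>
        let counts := (PySem.Set.ofList t.2.2).foldl
          (fun counts d => ((pvIndex cartoes).getD d []).foldl pvIncr counts)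
          (List.replicate cartoes.length (0 : Int))
        let fx := counts.foldl
          (fun fx a => if 11 ≤ a ∧ a ≤ 15 then fx.modify a 0 (· + 1) else fx) st.2
        (st.1 ++ [(t.1, counts)], fx)) := by
    funext st t
    simp only
    rw [counts_eq_map cartoes t.2.2]
    rw [PySem.List.foldl_prod_mk
      (f := fun (l : List Int) (c : List Int) =>
        l ++ [PySem.Set.len (PySem.Set.inter (PySem.Set.ofList c) (PySem.Set.ofList t.2.2))])
      (g := fun (fx : PySem.Dict Int Int) (c : List Int) =>
        if 11 ≤ PySem.Set.len (PySem.Set.inter (PySem.Set.ofList c) (PySem.Set.ofList t.2.2)) ∧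
            PySem.Set.len (PySem.Set.inter (PySem.Set.ofList c) (PySem.Set.ofList t.2.2)) ≤ 15
          then fx.modify (PySem.Set.len (PySem.Set.inter (PySem.Set.ofList c) (PySem.Set.ofList t.2.2))) 0 (· + 1)
          else fx)]
    rw [PySem.List.foldl_append_singleton_eq_map, List.foldl_map]
    simp
  rw [hfun]
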